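-- pv_equiv track=rewrite | github.com/chengdongzhang0710/visual-components-scripts | data-process/ElevatorAreaWaitingTime.py | cal_wait_time
-- ===== SOURCE A (Python) =====
-- def cal_wait_time(data):
--     wait_in = []
--     wait_out = []
--     for i in range(1, len(data)):
--         if data[i] > data[i - 1]:
--             for _ in range(data[i] - data[i - 1]):
--                 wait_in.append(i)
--         elif data[i] < data[i - 1]:
--             for _ in range(data[i - 1] - data[i]):
--                 wait_out.append(i)
--
--     if len(wait_in) != len(wait_out):
--         raise Exception("Flow balance is not satisfied!")
--
--     wait = []
--     for i in range(len(wait_out)):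
--         wait.append(wait_out[i] - wait_in[i])
--
--     return wait
-- ===== SOURCE B (Python) =====
-- def cal_wait_time(data):
--     # Run-length events: (index, units) for each rise / fall, in index order.
--     ins = []
--     outs = []
--     i = 1
--     for prev, cur in zip(data, data[1:]):
--         if cur > prev:
--             ins.append((i, cur - prev))
--         elif cur < prev:
--             outs.append((i, prev - cur))
--         i += 1
--     # Stream the out-units against the in-units with a cursor into `ins`,
--     # never materialising the expanded per-unit index lists.
--     wait = []
--     k = 0       # next unread in-run
--     cur_in = 0  # index of the in-run being consumed
--     rem = 0     # units left in that in-run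
--     for oi, cnt in outs:
--         for _ in range(cnt):
--             if rem == 0:
--                 if k == len(ins):
--                     raise Exception("Flow balance is not satisfied!")
--                 cur_in, rem = ins[k]
--                 k += 1
--             wait.append(oi - cur_in)
--             rem -= 1
--     if rem != 0 or k != len(ins):
--         raise Exception("Flow balance is not satisfied!")
--     return wait
-- ===== Notes on version B (the rewrite author's own statement) =====
-- stated objective: alternative
-- what changed: B replaces A's materialisation of the two expanded per-unit index lists (one entry per unit of flow, then a positional zip) by a run-length representation of rises and falls merged with two cursors, consuming one in-run against the out-runs without ever building the expanded lists.
import Mathlib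
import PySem

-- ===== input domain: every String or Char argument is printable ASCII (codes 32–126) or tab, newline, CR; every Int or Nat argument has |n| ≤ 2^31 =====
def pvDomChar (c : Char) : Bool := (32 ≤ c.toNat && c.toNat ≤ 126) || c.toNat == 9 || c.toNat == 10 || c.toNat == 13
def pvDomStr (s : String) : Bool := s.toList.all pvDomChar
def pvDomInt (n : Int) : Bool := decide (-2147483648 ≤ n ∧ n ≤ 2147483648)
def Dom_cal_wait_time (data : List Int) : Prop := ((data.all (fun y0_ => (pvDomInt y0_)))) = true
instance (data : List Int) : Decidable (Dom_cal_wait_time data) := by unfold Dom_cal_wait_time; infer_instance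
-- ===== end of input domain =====

-- B re-implements the pairing by run-length merge (two cursors over rise-runs and fall-runs)
-- instead of materialising the two expanded per-unit index lists; objective: alternative algorithm.
-- On unbalanced data both Pythons raise Exception("Flow balance is not satisfied!"); those inputs
-- are outside Pre_ and both ports return [] there.

-- ===== PORT A =====
-- the loop building wait_in / wait_out ('for _ in range(d): append(i)' is List.replicate d.toNat i)
def pvWaitLists (data : List Int) : List Int × List Int :=
  (PySem.List.pyRange 1 (data.length : Int) 1).foldl
    (fun (s : List Int × List Int) i =>
      if PySem.List.pyGetD data i 0 > PySem.List.pyGetD data (i - 1) 0 then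
        (s.1 ++ List.replicate (PySem.List.pyGetD data i 0 - PySem.List.pyGetD data (i - 1) 0).toNat i, s.2)
      else if PySem.List.pyGetD data i 0 < PySem.List.pyGetD data (i - 1) 0 then
        (s.1, s.2 ++ List.replicate (PySem.List.pyGetD data (i - 1) 0 - PySem.List.pyGetD data i 0).toNat i)
      else s)
    ([], [])

def cal_wait_time (data : List Int) : List Int :=
  if (pvWaitLists data).1.length ≠ (pvWaitLists data).2.length then []  -- raise: outside Pre_
  else (PySem.List.pyRange 0 ((pvWaitLists data).2.length : Int) 1).foldl
    (fun acc i => acc ++ [PySem.List.pyGetD (pvWaitLists data).2 i 0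
                          - PySem.List.pyGetD (pvWaitLists data).1 i 0]) []

-- ===== PORT B =====
-- the run-collecting loop over zip(data, data[1:]) with running index i
def pvRunsLoop : List (Int × Int) → List (Int × Int) → Int → List Int →
    List (Int × Int) × List (Int × Int)
  | ins, outs, i, a :: b :: t =>
      if b > a then pvRunsLoop (ins ++ [(i, b - a)]) outs (i + 1) (b :: t)
      else if b < a then pvRunsLoop ins (outs ++ [(i, a - b)]) (i + 1) (b :: t)
      else pvRunsLoop ins outs (i + 1) (b :: t)
  | ins, outs, _, _ => (ins, outs)

-- the inner 'for _ in range(cnt)' loop: consume one unit per step; none = raise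
def pvConsume (oi : Int) : Nat → List (Int × Int) → Int → Int → List Int →
    Option (List Int × List (Int × Int) × Int × Int)
  | 0, ins, cur, rem, acc => some (acc, ins, cur, rem)
  | Nat.succ n, ins, cur, rem, acc =>
      if rem = 0 then
        match ins with
        | [] => none
        | (ci, c) :: tl => pvConsume oi n tl ci (c - 1) (acc ++ [oi - ci])
      else pvConsume oi n ins cur (rem - 1) (acc ++ [oi - cur])

-- the outer 'for oi, cnt in outs' loop (cursor k into ins becomes the unread suffix of ins)
def pvMergeOuts : List (Int × Int) → List (Int × Int) → Int → Int → List Int →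
    Option (List Int × List (Int × Int) × Int × Int)
  | [], ins, cur, rem, acc => some (acc, ins, cur, rem)
  | (oi, c) :: os, ins, cur, rem, acc =>
      match pvConsume oi c.toNat ins cur rem acc with
      | none => none
      | some (acc', ins', cur', rem') => pvMergeOuts os ins' cur' rem' acc'

def cal_wait_time_alt (data : List Int) : List Int :=
  match pvMergeOuts (pvRunsLoop [] [] 1 data).2 (pvRunsLoop [] [] 1 data).1 0 0 [] with
  | none => []  -- raise: outside Pre_
  | some (w, ins', _, rem') => if rem' ≠ 0 ∨ ins' ≠ [] then [] else w  -- else-branch raises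

-- ===== PRECONDITION & SPEC =====
-- Pre_ excludes exactly the unbalanced inputs (total rise ≠ total fall, i.e. first ≠ last element),
-- on which Python A raises Exception("Flow balance is not satisfied!"); B raises the same there.
def Pre_cal_wait_time (data : List Int) : Prop := data.head? = data.getLast?
instance (data : List Int) : Decidable (Pre_cal_wait_time data) := by
  unfold Pre_cal_wait_time; infer_instance
def pvWitness_cal_wait_time : List Int := [0, 2, 1, 0]

def Spec_cal_wait_time (data : List Int) (out : List Int) : Prop := out = cal_wait_time_alt data
instance (data : List Int) (out : List Int) : Decidable (Spec_cal_wait_time data out) := by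
  unfold Spec_cal_wait_time; infer_instance

-- ===== CLAIM (what is proved, stated in full; the proofs are below) =====
def Claim_equal_cal_wait_time : Prop := ∀ (data : List Int), Dom_cal_wait_time data →
  Pre_cal_wait_time data → Spec_cal_wait_time data (cal_wait_time data)

-- ===== LEMMAS AND PROOFS =====
def pvExpand (rs : List (Int × Int)) : List Int :=
  rs.flatMap (fun p => List.replicate p.2.toNat p.1)

def pvStream (ins : List (Int × Int)) (cur rem : Int) : List Int :=
  List.replicate rem.toNat cur ++ pvExpand ins

def pvAllPos (rs : List (Int × Int)) : Prop := ∀ p ∈ rs, 0 < p.2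

theorem pvExpand_append (r s : List (Int × Int)) :
    pvExpand (r ++ s) = pvExpand r ++ pvExpand s := by
  simp [pvExpand]

theorem pvExpand_eq_nil {rs : List (Int × Int)} (h : pvAllPos rs)
    (he : pvExpand rs = []) : rs = [] := by
  cases rs with
  | nil => rfl
  | cons p tl =>
    exfalso
    have hp : 0 < p.2 := h p (by simp)
    have : p.2.toNat ≠ 0 := by omega
    simp [pvExpand, this] at he

theorem pvGetD_append_len (pre : List Int) (a : Int) (t : List Int) (d : Int) :
    (pre ++ a :: t).getD pre.length d = a := by
  induction pre with
  | nil => rfl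
  | cons x xs ih => simpa using ih

theorem pvRunsLoop_allPos : ∀ (l : List Int) (ins outs : List (Int × Int)) (i : Int),
    pvAllPos ins → pvAllPos outs →
    pvAllPos (pvRunsLoop ins outs i l).1 ∧ pvAllPos (pvRunsLoop ins outs i l).2 := by
  intro l
  induction l with
  | nil => intro ins outs i h1 h2; exact ⟨h1, h2⟩
  | cons a tl ih =>
    intro ins outs i h1 h2
    cases tl with
    | nil => exact ⟨h1, h2⟩
    | cons b t =>
      by_cases hab : b > a
      · simp only [pvRunsLoop, if_pos hab]
        refine ih (ins ++ [(i, b - a)]) outs (i + 1) ?_ h2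
        intro p hp
        rcases List.mem_append.1 hp with h | h
        · exact h1 p h
        · simp at h; subst h; simp; omega
      · by_cases hba : b < a
        · simp only [pvRunsLoop, if_neg hab, if_pos hba]
          refine ih ins (outs ++ [(i, a - b)]) (i + 1) h1 ?_
          intro p hp
          rcases List.mem_append.1 hp with h | h
          · exact h2 p h
          · simp at h; subst h; simp; omega
        · simp only [pvRunsLoop, if_neg hab, if_neg hba]
          exact ih ins outs (i + 1) h1 h2

-- A's run-building loop over range(1, len(data)) computes the expansions of B's run lists
theorem pvBridge (data : List Int) : ∀ (t pre : List Int) (a : Int)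
    (ins outs : List (Int × Int)),
    data = pre ++ a :: t →
    (PySem.List.pyRange ((pre.length : Int) + 1) (data.length : Int) 1).foldl
      (fun (s : List Int × List Int) i =>
        if PySem.List.pyGetD data i 0 > PySem.List.pyGetD data (i - 1) 0 then
          (s.1 ++ List.replicate (PySem.List.pyGetD data i 0 - PySem.List.pyGetD data (i - 1) 0).toNat i, s.2)
        else if PySem.List.pyGetD data i 0 < PySem.List.pyGetD data (i - 1) 0 then
          (s.1, s.2 ++ List.replicate (PySem.List.pyGetD data (i - 1) 0 - PySem.List.pyGetD data i 0).toNat i)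
        else s)
      (pvExpand ins, pvExpand outs)
    = (pvExpand (pvRunsLoop ins outs ((pre.length : Int) + 1) (a :: t)).1,
       pvExpand (pvRunsLoop ins outs ((pre.length : Int) + 1) (a :: t)).2) := by
  intro t
  induction t with
  | nil =>
    intro pre a ins outs h
    have hlen : data.length = pre.length + 1 := by subst h; simp
    have hnil : PySem.List.pyRange ((pre.length : Int) + 1) (data.length : Int) 1 = [] := by
      apply PySem.List.pyRange_one_eq_nil; rw [hlen]; push_cast; omega
    rw [hnil]
    rfl
  | cons b t' ih =>
    intro pre a ins outs h
    have hlen : data.length = pre.length + 2 + t'.length := by subst h; simp; omega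
    have hcons : PySem.List.pyRange ((pre.length : Int) + 1) (data.length : Int) 1
        = ((pre.length : Int) + 1) ::
          PySem.List.pyRange ((pre.length : Int) + 1 + 1) (data.length : Int) 1 := by
      apply PySem.List.pyRange_one_cons; rw [hlen]; push_cast; omega
    have hga : PySem.List.pyGetD data ((pre.length : Int) + 1 - 1) 0 = a := by
      have e : ((pre.length : Int) + 1 - 1) = ((pre.length : Nat) : Int) := by ring
      rw [e, PySem.List.pyGetD_natCast, h, pvGetD_append_len]
    have hgb : PySem.List.pyGetD data ((pre.length : Int) + 1) 0 = b := by
      have e : ((pre.length : Int) + 1) = (((pre ++ [a]).length : Nat) : Int) := by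
        simp
      rw [e, PySem.List.pyGetD_natCast, h]
      have e2 : pre ++ a :: b :: t' = (pre ++ [a]) ++ b :: t' := by simp
      rw [e2, pvGetD_append_len]
    have hidx : (((pre ++ [a]).length : Nat) : Int) + 1 = (pre.length : Int) + 1 + 1 := by
      simp
    have hdata : data = (pre ++ [a]) ++ b :: t' := by rw [h]; simp
    rw [hcons, List.foldl_cons]
    simp only [hga, hgb]
    by_cases h1 : b > a
    · rw [if_pos h1]
      have hexp : pvExpand ins ++ List.replicate (b - a).toNat ((pre.length : Int) + 1)
          = pvExpand (ins ++ [((pre.length : Int) + 1, b - a)]) := by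
        rw [pvExpand_append]; simp [pvExpand]
      have ihx := ih (pre ++ [a]) b (ins ++ [((pre.length : Int) + 1, b - a)]) outs hdata
      rw [hidx] at ihx
      simp only [pvRunsLoop, if_pos h1]
      rw [← ihx, hexp]
    · rw [if_neg h1]
      by_cases h2 : b < a
      · rw [if_pos h2]
        have hexp : pvExpand outs ++ List.replicate (a - b).toNat ((pre.length : Int) + 1)
            = pvExpand (outs ++ [((pre.length : Int) + 1, a - b)]) := by
          rw [pvExpand_append]; simp [pvExpand]
        have ihx := ih (pre ++ [a]) b ins (outs ++ [((pre.length : Int) + 1, a - b)]) hdata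
        rw [hidx] at ihx
        simp only [pvRunsLoop, if_neg h1, if_pos h2]
        rw [← ihx, hexp]
      · rw [if_neg h2]
        have ihx := ih (pre ++ [a]) b ins outs hdata
        rw [hidx] at ihx
        simp only [pvRunsLoop, if_neg h1, if_neg h2]
        exact ihx

theorem pvZipLemma (E I : List Int) (h : E.length = I.length) :
    ((PySem.List.pyRange 0 (E.length : Int) 1).map
      (fun i => PySem.List.pyGetD E i 0 - PySem.List.pyGetD I i 0))
      = List.zipWith (· - ·) E I := by
  apply List.ext_getElem
  · simp [PySem.List.length_pyRange_one, h]
  · intro k h1 h2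
    have hk : k < E.length := by
      simpa [PySem.List.length_pyRange_one] using h1
    have hk' : k < I.length := by omega
    simp only [List.getElem_map, PySem.List.getElem_pyRange_one, List.getElem_zipWith]
    have e1 : ((0 : Int) + (k : Int)) = ((k : Nat) : Int) := by ring
    rw [e1, PySem.List.pyGetD_natCast, PySem.List.pyGetD_natCast,
      List.getD_eq_getElem E 0 hk, List.getD_eq_getElem I 0 hk']

theorem pvZ (oi : Int) : ∀ (m : Nat) (S E' : List Int), m ≤ S.length →
    (S.take m).map (fun x => oi - x) ++ List.zipWith (· - ·) E' (S.drop m)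
      = List.zipWith (· - ·) (List.replicate m oi ++ E') S := by
  intro m
  induction m with
  | zero => intro S E' _; simp
  | succ n ih =>
    intro S E' h
    cases S with
    | nil => simp at h
    | cons s S' =>
      simp only [List.take_succ_cons, List.drop_succ_cons, List.replicate_succ,
        List.map_cons, List.cons_append, List.zipWith_cons_cons]
      rw [ih S' E' (by simpa using h)]

theorem pvConsume_succ (oi : Int) (n : Nat) (ins : List (Int × Int)) (cur rem : Int)
    (acc : List Int) :
    pvConsume oi (n + 1) ins cur rem acc =
      if rem = 0 then
        match ins with
        | [] => none
        | (ci, c) :: tl => pvConsume oi n tl ci (c - 1) (acc ++ [oi - ci])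
      else pvConsume oi n ins cur (rem - 1) (acc ++ [oi - cur]) := by
  cases ins <;> rfl

theorem pvConsume_spec (oi : Int) : ∀ (n : Nat) (ins : List (Int × Int)) (cur rem : Int)
    (acc : List Int), 0 ≤ rem → pvAllPos ins →
    (n ≤ (pvStream ins cur rem).length →
      ∃ ins' cur' rem', pvConsume oi n ins cur rem acc
          = some (acc ++ ((pvStream ins cur rem).take n).map (fun x => oi - x), ins', cur', rem')
        ∧ 0 ≤ rem' ∧ pvAllPos ins'
        ∧ pvStream ins' cur' rem' = (pvStream ins cur rem).drop n)
    ∧ ((pvStream ins cur rem).length < n → pvConsume oi n ins cur rem acc = none) := by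
  intro n
  induction n with
  | zero =>
    intro ins cur rem acc hr hp
    exact ⟨fun _ => ⟨ins, cur, rem, by simp [pvConsume], hr, hp, by simp⟩, by omega⟩
  | succ n ih =>
    intro ins cur rem acc hr hp
    by_cases hrem : rem = 0
    · subst hrem
      cases ins with
      | nil =>
        constructor
        · intro hle; exfalso; simp [pvStream, pvExpand] at hle
        · intro _; simp [pvConsume]
      | cons p tl =>
        obtain ⟨ci, c⟩ := p
        have hc : 0 < c := hp (ci, c) (by simp)
        have hstep : pvStream ((ci, c) :: tl) cur 0 = ci :: pvStream tl ci (c - 1) := by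
          have h1 : c.toNat = (c - 1).toNat + 1 := by omega
          simp only [pvStream, pvExpand, Int.toNat_zero, List.replicate_zero,
            List.nil_append, List.flatMap_cons, h1, List.replicate_succ, List.cons_append]
        have hp' : pvAllPos tl := fun q hq => hp q (by simp [hq])
        have ihx := ih tl ci (c - 1) (acc ++ [oi - ci]) (by omega) hp'
        constructor
        · intro hle
          rw [hstep] at hle
          simp only [List.length_cons] at hle
          obtain ⟨ins', cur', rem', heq, hr', hp'', hstr⟩ := ihx.1 (by omega)
          refine ⟨ins', cur', rem', ?_, hr', hp'', ?_⟩
          · show pvConsume oi (n + 1) ((ci, c) :: tl) cur 0 acc = _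
            rw [pvConsume_succ, if_pos rfl]
            show pvConsume oi n tl ci (c - 1) (acc ++ [oi - ci]) = _
            rw [heq, hstep]
            simp only [List.take_succ_cons, List.map_cons, List.append_assoc,
              List.singleton_append]
          · rw [hstr, hstep, List.drop_succ_cons]
        · intro hlt
          rw [hstep] at hlt
          simp only [List.length_cons] at hlt
          show pvConsume oi (n + 1) ((ci, c) :: tl) cur 0 acc = none
          rw [pvConsume_succ, if_pos rfl]
          exact ihx.2 (by omega)
    · have hr0 : 0 < rem := by omega
      have hstep : pvStream ins cur rem = cur :: pvStream ins cur (rem - 1) := by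
        have h1 : rem.toNat = (rem - 1).toNat + 1 := by omega
        simp only [pvStream, h1, List.replicate_succ, List.cons_append]
      have ihx := ih ins cur (rem - 1) (acc ++ [oi - cur]) (by omega) hp
      constructor
      · intro hle
        rw [hstep] at hle
        simp only [List.length_cons] at hle
        obtain ⟨ins', cur', rem', heq, hr', hp'', hstr⟩ := ihx.1 (by omega)
        refine ⟨ins', cur', rem', ?_, hr', hp'', ?_⟩
        · show pvConsume oi (n + 1) ins cur rem acc = _
          rw [pvConsume_succ, if_neg hrem, heq, hstep]
          simp only [List.take_succ_cons, List.map_cons, List.append_assoc,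
            List.singleton_append]
        · rw [hstr, hstep, List.drop_succ_cons]
      · intro hlt
        rw [hstep] at hlt
        simp only [List.length_cons] at hlt
        show pvConsume oi (n + 1) ins cur rem acc = none
        rw [pvConsume_succ, if_neg hrem]
        exact ihx.2 (by omega)

theorem pvMerge_spec : ∀ (outs ins : List (Int × Int)) (cur rem : Int) (acc : List Int),
    0 ≤ rem → pvAllPos ins → pvAllPos outs →
    ((pvExpand outs).length ≤ (pvStream ins cur rem).length →
      ∃ ins' cur' rem', pvMergeOuts outs ins cur rem acc
          = some (acc ++ List.zipWith (· - ·) (pvExpand outs) (pvStream ins cur rem), ins', cur', rem')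
        ∧ 0 ≤ rem' ∧ pvAllPos ins'
        ∧ pvStream ins' cur' rem' = (pvStream ins cur rem).drop (pvExpand outs).length)
    ∧ ((pvStream ins cur rem).length < (pvExpand outs).length →
        pvMergeOuts outs ins cur rem acc = none) := by
  intro outs
  induction outs with
  | nil =>
    intro ins cur rem acc hr hpi _
    refine ⟨fun _ => ⟨ins, cur, rem, ?_, hr, hpi, by simp [pvExpand]⟩, ?_⟩
    · simp [pvMergeOuts, pvExpand]
    · intro h; simp [pvExpand] at h
  | cons p os ih =>
    intro ins cur rem acc hr hpi hpo
    obtain ⟨oi, c⟩ := p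
    have hc : 0 < c := hpo (oi, c) (by simp)
    have hpo' : pvAllPos os := fun q hq => hpo q (by simp [hq])
    have hE : pvExpand ((oi, c) :: os) = List.replicate c.toNat oi ++ pvExpand os := by
      simp [pvExpand]
    have hcs := pvConsume_spec oi c.toNat ins cur rem acc hr hpi
    set S := pvStream ins cur rem with hS
    by_cases hcle : c.toNat ≤ S.length
    · obtain ⟨ins1, cur1, rem1, heq1, hr1, hp1, hstr1⟩ := hcs.1 hcle
      have ihx := ih ins1 cur1 rem1 (acc ++ (S.take c.toNat).map (fun x => oi - x))
        hr1 hp1 hpo'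
      rw [hstr1] at ihx
      constructor
      · intro hle
        rw [hE] at hle
        simp only [List.length_append, List.length_replicate] at hle
        have hle' : (pvExpand os).length ≤ (S.drop c.toNat).length := by
          simp [List.length_drop]; omega
        obtain ⟨ins2, cur2, rem2, heq2, hr2, hp2, hstr2⟩ := ihx.1 hle'
        refine ⟨ins2, cur2, rem2, ?_, hr2, hp2, ?_⟩
        · show pvMergeOuts ((oi, c) :: os) ins cur rem acc = _
          simp only [pvMergeOuts]
          rw [heq1]
          show pvMergeOuts os ins1 cur1 rem1 (acc ++ (S.take c.toNat).map (fun x => oi - x)) = _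
          rw [heq2, hE, List.append_assoc, pvZ oi c.toNat S (pvExpand os) hcle]
        · rw [hstr2, hE, List.drop_drop, List.length_append, List.length_replicate,
            Nat.add_comm]
      · intro hlt
        rw [hE] at hlt
        simp only [List.length_append, List.length_replicate] at hlt
        have hlt' : (S.drop c.toNat).length < (pvExpand os).length := by
          simp [List.length_drop]; omega
        show pvMergeOuts ((oi, c) :: os) ins cur rem acc = none
        simp only [pvMergeOuts]
        rw [heq1]
        exact ihx.2 hlt'
    · have hnone := hcs.2 (by omega)
      have hmnone : pvMergeOuts ((oi, c) :: os) ins cur rem acc = none := by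
        simp only [pvMergeOuts]
        rw [hnone]
      refine ⟨fun hle => ?_, fun _ => hmnone⟩
      exfalso
      rw [hE] at hle
      simp only [List.length_append, List.length_replicate] at hle
      omega

theorem pvStream_nil {ins : List (Int × Int)} {cur rem : Int} (hr : 0 ≤ rem)
    (hp : pvAllPos ins) (h : pvStream ins cur rem = []) : rem = 0 ∧ ins = [] := by
  unfold pvStream at h
  rcases List.append_eq_nil_iff.1 h with ⟨h1, h2⟩
  have : rem.toNat = 0 := by simpa using congrArg List.length h1
  exact ⟨by omega, pvExpand_eq_nil hp h2⟩

theorem pvMain (data : List Int) : cal_wait_time data = cal_wait_time_alt data := by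
  have hrun : pvWaitLists data
      = (pvExpand (pvRunsLoop [] [] 1 data).1, pvExpand (pvRunsLoop [] [] 1 data).2) := by
    match data with
    | [] =>
      unfold pvWaitLists
      rw [PySem.List.pyRange_one_eq_nil (by simp)]
      rfl
    | [a] =>
      unfold pvWaitLists
      rw [PySem.List.pyRange_one_eq_nil (by simp)]
      rfl
    | a :: b :: t =>
      have hb := pvBridge (a :: b :: t) (b :: t) [] a [] [] rfl
      simpa [pvWaitLists, pvExpand] using hb
  have hpos := pvRunsLoop_allPos data [] [] 1 (by simp [pvAllPos]) (by simp [pvAllPos])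
  obtain ⟨hpI, hpE⟩ := hpos
  have hS : pvStream (pvRunsLoop [] [] 1 data).1 0 0 = pvExpand (pvRunsLoop [] [] 1 data).1 := by
    simp [pvStream]
  have hmerge := pvMerge_spec (pvRunsLoop [] [] 1 data).2 (pvRunsLoop [] [] 1 data).1 0 0 []
    le_rfl hpI hpE
  rw [hS] at hmerge
  set I := pvExpand (pvRunsLoop [] [] 1 data).1 with hI
  set E := pvExpand (pvRunsLoop [] [] 1 data).2 with hE
  by_cases hle : E.length ≤ I.length
  · obtain ⟨ins', cur', rem', heq, hr', hp', hstr⟩ := hmerge.1 hle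
    by_cases heqlen : I.length = E.length
    · -- balanced: both return the zipWith
      have hdrop : I.drop E.length = [] := by
        rw [← heqlen, List.drop_length]
      rw [hdrop] at hstr
      obtain ⟨hrem0, hins0⟩ := pvStream_nil hr' hp' hstr
      have hA : cal_wait_time data = List.zipWith (· - ·) E I := by
        unfold cal_wait_time
        rw [hrun]
        simp only [ne_eq]
        rw [if_neg (by simp [heqlen])]
        rw [PySem.List.foldl_append_singleton_eq_map]
        exact pvZipLemma E I (by omega)
      have hB : cal_wait_time_alt data = List.zipWith (· - ·) E I := by
        unfold cal_wait_time_alt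
        rw [heq]
        simp [hrem0, hins0]
      rw [hA, hB]
    · -- E shorter than I: A raises (returns []), B's leftover check fires (returns [])
      have hA : cal_wait_time data = [] := by
        unfold cal_wait_time
        rw [hrun]
        rw [if_pos (by simp; omega)]
      have hB : cal_wait_time_alt data = [] := by
        unfold cal_wait_time_alt
        rw [heq]
        have hne : ¬(rem' = 0 ∧ ins' = []) := by
          rintro ⟨h1, h2⟩
          rw [h1, h2] at hstr
          have : (I.drop E.length).length = 0 := by
            rw [← hstr]; simp [pvStream, pvExpand]
          rw [List.length_drop] at this
          omega
        by_cases h1 : rem' = 0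
        · have h2 : ins' ≠ [] := fun h2 => hne ⟨h1, h2⟩
          simp [h1, h2]
        · simp [h1]
      rw [hA, hB]
  · -- E longer than I: both raise (return [])
    have hnone := hmerge.2 (by omega)
    have hA : cal_wait_time data = [] := by
      unfold cal_wait_time
      rw [hrun]
      rw [if_pos (by simp; omega)]
    have hB : cal_wait_time_alt data = [] := by
      unfold cal_wait_time_alt
      rw [hnone]
    rw [hA, hB]

-- ===== VERDICT (by name: the statement is the Claim_ definition above) =====
theorem cal_wait_time_spec : Claim_equal_cal_wait_time := by
  intro data _ _
  unfold Spec_cal_wait_time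
  exact pvMain data
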